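-- pv_equiv track=rewrite | github.com/MykeChidi/vulnradar | tests/security/conftest.py | contains_unescaped_html
-- ===== SOURCE A (Python) =====
-- def contains_unescaped_html(content: str) -> bool:
--     """Check if content contains unescaped HTML that could lead to XSS."""
--     # For the test, we want to detect if content contains dangerous HTML tags
--     # that SHOULD be escaped in reports
--     dangerous_patterns = [
--         "<script",
--         "<iframe",
--         "<img",
--         "<svg",
--         "onerror=",
--         "onload=",
--         "onclick=",
--         "javascript:",
--     ]
--
--     content_lower = content.lower()
--     for pattern in dangerous_patterns:
--         if pattern in content_lower:
--             # The pattern exists - this should be escaped in reports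
--             # Return True to indicate unescaped HTML is present
--             return True
--
--     return False
-- ===== SOURCE B (Python) =====
-- def contains_unescaped_html(content: str) -> bool:
--     """Check if content contains unescaped HTML that could lead to XSS.
--
--     Single pass with first-character dispatch: walk the lowercased content
--     once; at a position whose character is '<', 'o' or 'j', test only the
--     pattern tails that can start with that character.
--     """
--     by_first = {
--         "<": ("script", "iframe", "img", "svg"),
--         "o": ("nerror=", "nload=", "nclick="),
--         "j": ("avascript:",),
--     }
--     lo = content.lower()
--     for i, c in enumerate(lo):
--         tails = by_first.get(c)
--         if tails is not None and any(lo.startswith(t, i + 1) for t in tails):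
--             return True
--     return False
-- ===== Notes on version B (the rewrite author's own statement) =====
-- stated objective: alternative
-- what changed: A runs eight separate short-circuiting substring membership scans over the lowercased content; B makes one left-to-right pass over it, dispatching on the current character through a dict keyed by each pattern's first character so only the matching pattern tails are compared at a position.
import Mathlib
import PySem

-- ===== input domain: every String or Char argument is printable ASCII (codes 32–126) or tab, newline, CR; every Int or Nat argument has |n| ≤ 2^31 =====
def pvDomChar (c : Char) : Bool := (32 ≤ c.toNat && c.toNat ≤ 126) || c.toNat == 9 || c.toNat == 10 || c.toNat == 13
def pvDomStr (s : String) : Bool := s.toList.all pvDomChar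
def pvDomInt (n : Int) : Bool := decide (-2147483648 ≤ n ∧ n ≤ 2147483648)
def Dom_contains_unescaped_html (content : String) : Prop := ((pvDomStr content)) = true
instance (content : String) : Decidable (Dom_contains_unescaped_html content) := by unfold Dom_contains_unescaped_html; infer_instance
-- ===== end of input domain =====

-- B replaces A's eight whole-string 'in' scans by one left-to-right pass with
-- first-character dispatch (alternative decomposition, not claimed faster).

-- ===== PORT A =====
-- A's dangerous_patterns list (string literals written as their character lists)
def pvPatsA : List (List Char) :=
  [['<','s','c','r','i','p','t'], ['<','i','f','r','a','m','e'],
   ['<','i','m','g'], ['<','s','v','g'],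
   ['o','n','e','r','r','o','r','='], ['o','n','l','o','a','d','='],
   ['o','n','c','l','i','c','k','='], ['j','a','v','a','s','c','r','i','p','t',':']]

def contains_unescaped_html (content : String) : Bool :=
  let content_lower := PySem.Chars.lower content.toList
  -- 'for pattern in dangerous_patterns: if pattern in content_lower: return True' / 'return False'
  pvPatsA.any (fun pattern => PySem.Chars.isIn pattern content_lower)

-- ===== PORT B =====
-- B's by_first dict: first character of a pattern ↦ the pattern tails starting with it
def pvByFirst (c : Char) : List (List Char) :=
  if c = '<' then
    [['s','c','r','i','p','t'], ['i','f','r','a','m','e'], ['i','m','g'], ['s','v','g']]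
  else if c = 'o' then
    [['n','e','r','r','o','r','='], ['n','l','o','a','d','='], ['n','c','l','i','c','k','=']]
  else if c = 'j' then
    [['a','v','a','s','c','r','i','p','t',':']]
  else []

-- 'for i, c in enumerate(lo): if tails and any(lo.startswith(t, i+1) …): return True'
-- the suffix lo[i+1:] is 'rest' in the structural recursion below
def pvScanB : List Char → Bool
  | [] => false
  | c :: rest =>
      if (pvByFirst c).any (fun t => PySem.Chars.startswith rest t) then true
      else pvScanB rest

def contains_unescaped_html_alt (content : String) : Bool :=
  pvScanB (PySem.Chars.lower content.toList)

-- ===== PRECONDITION & SPEC =====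
def Spec_contains_unescaped_html (content : String) (out : Bool) : Prop := out = contains_unescaped_html_alt content
instance (content : String) (out : Bool) : Decidable (Spec_contains_unescaped_html content out) := by unfold Spec_contains_unescaped_html; infer_instance

-- ===== CLAIM (what is proved, stated in full; the proofs are below) =====
def Claim_equal_contains_unescaped_html : Prop := ∀ (content : String), Dom_contains_unescaped_html content → Spec_contains_unescaped_html content (contains_unescaped_html content)

-- ===== LEMMAS AND PROOFS =====

-- Bool form of the startswith bridge
lemma pvSW (s p : List Char) : PySem.Chars.startswith s p = decide (p <+: s) := by
  by_cases h : p <+: s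
  · simp [PySem.Chars.startswith_iff, h]
  · simp only [h, decide_false]
    rw [← Bool.not_eq_true, PySem.Chars.startswith_iff]
    exact h

-- one dispatch step of B equals 'some whole pattern is a prefix here'
lemma pvDispatch_eq (c : Char) (rest : List Char) :
    ((pvByFirst c).any fun t => PySem.Chars.startswith rest t)
      = (pvPatsA.any fun p => decide (p <+: (c :: rest))) := by
  simp only [pvPatsA, pvByFirst, List.any_cons, List.any_nil, List.cons_prefix_cons, pvSW]
  by_cases h1 : c = '<' <;> by_cases h2 : c = 'o' <;> by_cases h3 : c = 'j' <;> simp_all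
  exact ⟨fun h => absurd h.symm h1, fun h => absurd h.symm h1, fun h => absurd h.symm h1,
    fun h => absurd h.symm h1, fun h => absurd h.symm h2, fun h => absurd h.symm h2,
    fun h => absurd h.symm h2, fun h => absurd h.symm h3⟩

-- B's scan finds exactly the suffixes some pattern prefixes
lemma pvScanB_iff (s : List Char) :
    pvScanB s = true ↔ ∃ p ∈ pvPatsA, ∃ j, p <+: s.drop j := by
  induction s with
  | nil =>
    simp only [pvScanB, List.drop_nil]
    constructor
    · intro h; exact absurd h (by decide)
    · rintro ⟨p, hp, j, hpre⟩
      have hnil : p = [] := List.prefix_nil.mp hpre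
      subst hnil
      revert hp; decide
  | cons c rest ih =>
    rw [pvScanB]
    split_ifs with h
    · simp only [true_iff]
      rw [pvDispatch_eq] at h
      simp only [List.any_eq_true, decide_eq_true_eq] at h
      obtain ⟨p, hp, hpre⟩ := h
      exact ⟨p, hp, 0, by simpa using hpre⟩
    · rw [pvDispatch_eq] at h
      simp only [List.any_eq_true, decide_eq_true_eq, not_exists, not_and] at h
      constructor
      · rw [ih]
        rintro ⟨p, hp, j, hpre⟩
        exact ⟨p, hp, j + 1, by simpa using hpre⟩
      · rintro ⟨p, hp, j, hpre⟩
        cases j with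
        | zero => exact absurd hpre (by simpa using h p hp)
        | succ j =>
          rw [ih]
          exact ⟨p, hp, j, by simpa using hpre⟩

-- ===== VERDICT (by name: the statement is the Claim_ definition above) =====
theorem contains_unescaped_html_spec : Claim_equal_contains_unescaped_html := by
  intro content _
  unfold Spec_contains_unescaped_html contains_unescaped_html contains_unescaped_html_alt
  rw [Bool.eq_iff_iff]
  rw [pvScanB_iff]
  simp only [List.any_eq_true]
  constructor
  · rintro ⟨p, hp, hin⟩
    obtain ⟨j, hj⟩ := (PySem.Chars.exists_prefix_drop_iff_isIn p _).mpr hin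
    exact ⟨p, hp, j, hj⟩
  · rintro ⟨p, hp, j, hj⟩
    exact ⟨p, hp, (PySem.Chars.exists_prefix_drop_iff_isIn p _).mp ⟨j, hj⟩⟩
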